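-- pv_equiv track=rewrite | github.com/sainacharkas76/Web-scraper | functions.py | medline_formatting
-- ===== SOURCE A (Python) =====
-- def medline_formatting(medline_string):
--
--     medline_list = medline_string.split('\n')
--
--     ls = []
--     for elem in medline_list:
--         if elem == '':
--             continue
--         elif elem[0:4] != '    ':
--             elem = elem.strip()
--             elem = elem.replace('\n', '')
--             ls.append(elem)
--         else:
--             elem = elem.strip()
--             elem = elem.replace('\n', '')
--             ls[-1] = ls[-1] + ' ' + elem
--
--     ls_2 = []
--     for elem in ls:
--         key = elem[0:4].strip()
--         value = elem[5:].strip()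
--
--         ls_2.append([key, value])
--
--     return ls_2
-- ===== SOURCE B (Python) =====
-- def medline_formatting(medline_string):
--     # Single pass: keep the current record joined in an accumulator and emit the
--     # [key, value] pair as soon as the record is complete (and once at the end).
--     result = []
--     cur = None
--     for line in medline_string.split('\n'):
--         if line == '':
--             continue
--         if line.startswith('    '):
--             if cur is None:
--                 cur = line.strip()
--             else:
--                 cur = cur + ' ' + line.strip()
--         else:
--             if cur is not None:
--                 result.append([cur[0:4].strip(), cur[5:].strip()])
--             cur = line.strip()
--     if cur is not None:
--         result.append([cur[0:4].strip(), cur[5:].strip()])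
--     return result
-- ===== Notes on version B (the rewrite author's own statement) =====
-- stated objective: simpler
-- what changed: Replaces A's two-phase pipeline (build a list of joined record strings with in-place mutation of the last element, then a second loop reformatting each into [key, value]) with a single pass that keeps the current record in an accumulator and emits each pair at record boundaries.
import Mathlib
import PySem

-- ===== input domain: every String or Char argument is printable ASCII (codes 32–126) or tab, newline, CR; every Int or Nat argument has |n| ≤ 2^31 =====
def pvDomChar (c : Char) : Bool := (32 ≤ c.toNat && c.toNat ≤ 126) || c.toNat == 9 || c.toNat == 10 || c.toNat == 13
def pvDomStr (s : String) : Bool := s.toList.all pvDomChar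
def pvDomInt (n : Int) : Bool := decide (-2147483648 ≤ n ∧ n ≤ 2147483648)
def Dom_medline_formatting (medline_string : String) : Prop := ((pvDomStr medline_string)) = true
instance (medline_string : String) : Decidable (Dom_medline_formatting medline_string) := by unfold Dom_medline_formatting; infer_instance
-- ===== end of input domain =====

-- B replaces A's two-phase build-then-format loops (with in-place mutation of the
-- last list element) by a single pass that joins the current record in an
-- accumulator and emits each [key, value] pair at record boundaries (objective: simpler).

-- ===== PORT A =====
def pvNormA (elem : String) : String :=
  PySem.Str.replace (PySem.Str.strip elem) "\n" ""

def pvStepA (ls : List String) (elem : String) : List String :=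
  if elem == "" then ls
  else if PySem.Str.slice elem (some 0) (some 4) ≠ "    " then
    ls ++ [pvNormA elem]
  else
    match ls.getLast? with
    | some last => ls.dropLast ++ [last ++ " " ++ pvNormA elem]   -- ls[-1] = ls[-1] + ' ' + elem
    | none => ls   -- Python raises IndexError here (ls[-1] on empty ls) — excluded by Pre_

def pvPairA (elem : String) : List String :=
  [PySem.Str.strip (PySem.Str.slice elem (some 0) (some 4)),
   PySem.Str.strip (PySem.Str.slice elem (some 5) none)]

def medline_formatting (medline_string : String) : List (List String) :=
  let medline_list := (PySem.Str.split? medline_string "\n").getD []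
  let ls := medline_list.foldl pvStepA []
  ls.foldl (fun ls_2 elem => ls_2 ++ [pvPairA elem]) []

-- ===== PORT B =====
def pvEmitB (cur : String) : List String :=
  [PySem.Str.strip (PySem.Str.slice cur (some 0) (some 4)),
   PySem.Str.strip (PySem.Str.slice cur (some 5) none)]

def pvGoB : List String → Option String → List (List String) → List (List String)
  | [], none, acc => acc
  | [], some c, acc => acc ++ [pvEmitB c]
  | line :: rest, cur, acc =>
    if line == "" then pvGoB rest cur acc
    else if PySem.Str.startswith line "    " then
      match cur with
      | none => pvGoB rest (some (PySem.Str.strip line)) acc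
      | some c => pvGoB rest (some (c ++ " " ++ PySem.Str.strip line)) acc
    else
      match cur with
      | none => pvGoB rest (some (PySem.Str.strip line)) acc
      | some c => pvGoB rest (some (PySem.Str.strip line)) (acc ++ [pvEmitB c])

def medline_formatting_alt (medline_string : String) : List (List String) :=
  pvGoB ((PySem.Str.split? medline_string "\n").getD []) none []

-- ===== PRECONDITION & SPEC =====
-- Pre_ excludes exactly the inputs whose first non-empty line starts with four
-- spaces: there A's `ls[-1]` is evaluated with `ls` empty and raises IndexError.
def Pre_medline_formatting (medline_string : String) : Prop :=
  ((((PySem.Str.split? medline_string "\n").getD []).find? (fun l => !(l == ""))).all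
    (fun l => !PySem.Str.startswith l "    ")) = true

instance (medline_string : String) : Decidable (Pre_medline_formatting medline_string) := by
  unfold Pre_medline_formatting; infer_instance

def pvWitness_medline_formatting : String := "TI  - Some title\n      continued"

def Spec_medline_formatting (medline_string : String) (out : List (List String)) : Prop := out = medline_formatting_alt medline_string
instance (medline_string : String) (out : List (List String)) : Decidable (Spec_medline_formatting medline_string out) := by unfold Spec_medline_formatting; infer_instance

-- ===== CLAIM (what is proved, stated in full; the proofs are below) =====
def Claim_equal_medline_formatting : Prop := ∀ (medline_string : String), Dom_medline_formatting medline_string → Pre_medline_formatting medline_string → Spec_medline_formatting medline_string (medline_formatting medline_string)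

-- ===== LEMMAS AND PROOFS =====

-- replace with an absent single-character pattern is the identity
theorem pv_replace_go_id (fuel : Nat) (l acc : List Char) (h : '\n' ∉ l) :
    PySem.Chars.replace.go ['\n'] [] fuel l acc = acc.reverse ++ l := by
  induction fuel generalizing l acc with
  | zero => rw [PySem.Chars.replace.go]
  | succ n ih =>
    cases l with
    | nil => rw [PySem.Chars.replace.go]; simp; omega
    | cons c t =>
      rw [PySem.Chars.replace.go]
      have hc : c ≠ '\n' := by intro he; exact h (by simp [he])
      have hp : List.isPrefixOf ['\n'] (c :: t) = false := by
        simp [List.isPrefixOf]; exact fun he => hc he.symm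
      simp only [hp]
      rw [if_neg (by simp)]
      rw [ih t (c :: acc) (fun hm => h (List.mem_cons_of_mem _ hm))]
      simp

theorem pv_replace_id (s : String) (h : '\n' ∉ s.toList) :
    PySem.Str.replace s "\n" "" = s := by
  unfold PySem.Str.replace PySem.Chars.replace
  have h1 : "\n".toList = ['\n'] := by decide
  have h2 : "".toList = ([] : List Char) := by decide
  rw [h1, h2, if_neg (by decide), pv_replace_go_id _ _ _ h]
  simp [String.ofList_toList]

theorem pv_strip_no_nl (s : String) (h : '\n' ∉ s.toList) :
    '\n' ∉ (PySem.Str.strip s).toList := by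
  intro hm
  apply h
  have h1 : (PySem.Str.strip s).toList.Sublist s.toList := by
    rw [PySem.Str.toList_strip]
    unfold PySem.Chars.strip PySem.Chars.rstrip PySem.Chars.lstrip
    have a1 := (List.dropWhile_sublist (l := (List.dropWhile PySem.Chars.isspace s.toList).reverse) PySem.Chars.isspace).reverse
    rw [List.reverse_reverse] at a1
    exact a1.trans (List.dropWhile_sublist _)
  exact h1.mem hm

theorem pv_norm_eq_strip (e : String) (h : '\n' ∉ e.toList) :
    pvNormA e = PySem.Str.strip e := by
  unfold pvNormA
  exact pv_replace_id _ (pv_strip_no_nl _ h)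

-- members of split('\n') contain no newline
theorem pv_splitOn_go_no_nl (fuel : Nat) (l cur : List Char) (acc : List (List Char))
    (hl : l.length ≤ fuel) (hcur : '\n' ∉ cur) (hacc : ∀ m ∈ acc, '\n' ∉ m) :
    ∀ m ∈ PySem.Chars.splitOn.go ['\n'] fuel l cur acc, '\n' ∉ m := by
  induction fuel generalizing l cur acc with
  | zero =>
    have : l = [] := by cases l <;> simp_all
    subst this
    rw [PySem.Chars.splitOn.go]
    intro m hm
    simp at hm
    rcases hm with hm | rfl
    · exact hacc m hm
    · simpa using hcur
  | succ n ih =>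
    cases l with
    | nil =>
      rw [PySem.Chars.splitOn.go]
      · intro m hm
        simp at hm
        rcases hm with hm | rfl
        · exact hacc m hm
        · simpa using hcur
      · omega
    | cons c t =>
      rw [PySem.Chars.splitOn.go]
      by_cases hc : c = '\n'
      · have hp : List.isPrefixOf ['\n'] (c :: t) = true := by simp [List.isPrefixOf, hc]
        simp only [hp, if_pos]
        apply ih t [] (cur.reverse :: acc) (by simpa using Nat.le_of_succ_le_succ hl) (by simp)
        intro m hm
        simp at hm
        rcases hm with rfl | hm
        · simpa using hcur
        · exact hacc m hm
      · have hp : List.isPrefixOf ['\n'] (c :: t) = false := by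
          simp [List.isPrefixOf]; exact fun he => hc he.symm
        simp only [hp]
        rw [if_neg (by simp)]
        apply ih t (c :: cur) acc (Nat.le_of_succ_le_succ hl)
        · intro hm; simp at hm; rcases hm with hm | hm
          · exact hc hm.symm
          · exact hcur hm
        · exact hacc

theorem pv_split_no_nl (s : String) :
    ∀ e ∈ (PySem.Str.split? s "\n").getD [], '\n' ∉ e.toList := by
  intro e he
  unfold PySem.Str.split? PySem.Chars.split? at he
  rw [if_neg (by decide)] at he
  have h1 : "\n".toList = ['\n'] := by decide
  simp only [h1] at he
  simp only [Option.map_some, Option.getD_some, List.mem_map] at he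
  obtain ⟨m, hm, rfl⟩ := he
  unfold PySem.Chars.splitOn at hm
  rw [String.toList_ofList]
  exact pv_splitOn_go_no_nl _ _ _ _ (by omega) (by simp) (by simp) m hm

-- A's slice test agrees with B's startswith test
theorem pv_slice04 (l : String) :
    (PySem.Str.slice l (some 0) (some 4)).toList = l.toList.take 4 := by
  simp [PySem.Str.toList_slice, PySem.Chars.slice_eq_listSlice]
  rw [PySem.List.slice_to]
  · rw [show Int.toNat 4 = 4 from rfl]
  · norm_num

theorem pv_startswith_iff_slice (l : String) :
    PySem.Str.startswith l "    " = true ↔ PySem.Str.slice l (some 0) (some 4) = "    " := by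
  rw [show PySem.Str.startswith l "    " = PySem.Chars.startswith l.toList "    ".toList from
    PySem.Str.startswith_eq l "    "]
  rw [PySem.Chars.startswith_iff]
  constructor
  · intro h
    have h4 : "    ".toList.length = 4 := by decide
    have := (List.prefix_iff_eq_take.mp h)
    rw [h4] at this
    have hl : (PySem.Str.slice l (some 0) (some 4)).toList = "    ".toList := by
      rw [pv_slice04]; exact this.symm
    have := congrArg String.ofList hl
    simpa [String.ofList_toList] using this
  · intro h
    rw [List.prefix_iff_eq_take]
    have := congrArg String.toList h
    rw [pv_slice04] at this
    simpa using this.symm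

-- A's second loop is a map
theorem pv_foldl_pair (ls : List String) (acc : List (List String)) :
    ls.foldl (fun a e => a ++ [pvPairA e]) acc = acc ++ ls.map pvPairA := by
  induction ls generalizing acc with
  | nil => simp
  | cons x xs ih => simp [List.foldl, ih]

theorem pv_stepA_ne (l : List String) (x : String) (h : l ≠ []) : pvStepA l x ≠ [] := by
  unfold pvStepA
  split_ifs with h1 h2
  · exact h
  · simp
  · cases hg : l.getLast? with
    | none => exact h
    | some last => simp

theorem pv_stepA_append (p l : List String) (x : String) (h : l ≠ []) :
    pvStepA (p ++ l) x = p ++ pvStepA l x := by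
  unfold pvStepA
  split_ifs with h1 h2
  · rfl
  · simp
  · have hg : (p ++ l).getLast? = l.getLast? := by
      rw [List.getLast?_append]
      cases hgl : l.getLast? with
      | none => exact absurd (List.getLast?_eq_none_iff.mp hgl) h
      | some last => simp
    rw [hg]
    cases hgl : l.getLast? with
    | none => exact absurd (List.getLast?_eq_none_iff.mp hgl) h
    | some last =>
      rw [List.dropLast_append, if_neg (by simpa using h)]
      simp

theorem pv_stepA_shift (lines : List String) (p l : List String) (h : l ≠ []) :
    lines.foldl pvStepA (p ++ l) = p ++ lines.foldl pvStepA l := by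
  induction lines generalizing l with
  | nil => rfl
  | cons x rest ih =>
    simp only [List.foldl_cons]
    rw [pv_stepA_append p l x h, ih _ (pv_stepA_ne l x h)]

theorem pv_goB_some (lines : List String) (c : String) (acc : List (List String))
    (h : ∀ e ∈ lines, '\n' ∉ e.toList) :
    pvGoB lines (some c) acc = acc ++ (lines.foldl pvStepA [c]).map pvPairA := by
  induction lines generalizing c acc with
  | nil => simp [pvGoB, pvEmitB, pvPairA]
  | cons line rest ih =>
    have hline : '\n' ∉ line.toList := h line (by simp)
    have hrest : ∀ e ∈ rest, '\n' ∉ e.toList := fun e he => h e (by simp [he])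
    simp only [List.foldl_cons]
    rw [pvGoB]
    by_cases hE : line = ""
    · rw [if_pos (by simp [hE])]
      rw [show pvStepA [c] line = [c] by simp [pvStepA, hE]]
      exact ih c acc hrest
    · rw [if_neg (by simp [hE])]
      by_cases hS : PySem.Str.startswith line "    " = true
      · rw [if_pos hS]
        have hstep : pvStepA [c] line = [c ++ " " ++ PySem.Str.strip line] := by
          unfold pvStepA
          rw [if_neg (by simp [hE]), if_neg (by simp [(pv_startswith_iff_slice line).mp hS])]
          simp [pv_norm_eq_strip line hline]
        rw [hstep]
        exact ih _ acc hrest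
      · rw [if_neg hS]
        have hstep : pvStepA [c] line = [c] ++ [PySem.Str.strip line] := by
          unfold pvStepA
          rw [if_neg (by simp [hE]),
            if_pos (fun hc => hS ((pv_startswith_iff_slice line).mpr hc))]
          simp [pv_norm_eq_strip line hline]
        rw [hstep, pv_stepA_shift rest [c] [PySem.Str.strip line] (by simp)]
        rw [ih _ (acc ++ [pvEmitB c]) hrest]
        simp [pvEmitB, pvPairA]

theorem pv_goB_none (lines : List String) (acc : List (List String))
    (h : ∀ e ∈ lines, '\n' ∉ e.toList)
    (hpre : (lines.find? (fun l => !(l == ""))).all (fun l => !PySem.Str.startswith l "    ") = true) :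
    pvGoB lines none acc = acc ++ (lines.foldl pvStepA []).map pvPairA := by
  induction lines generalizing acc with
  | nil => simp [pvGoB]
  | cons line rest ih =>
    have hline : '\n' ∉ line.toList := h line (by simp)
    have hrest : ∀ e ∈ rest, '\n' ∉ e.toList := fun e he => h e (by simp [he])
    simp only [List.foldl_cons]
    rw [pvGoB]
    by_cases hE : line = ""
    · rw [if_pos (by simp [hE])]
      rw [show pvStepA [] line = [] by simp [pvStepA, hE]]
      apply ih acc hrest
      rw [List.find?_cons_of_neg (p := fun l => !(l == "")) (h := by simp [hE])] at hpre
      exact hpre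
    · rw [List.find?_cons_of_pos (p := fun l => !(l == "")) (h := by simp [hE])] at hpre
      have hS : PySem.Str.startswith line "    " = false := by
        simpa [Option.all] using hpre
      have hS2 : ¬ (PySem.Str.startswith line "    " = true) := by rw [hS]; simp
      rw [if_neg (by simp [hE]), if_neg hS2]
      have hstep : pvStepA [] line = [PySem.Str.strip line] := by
        unfold pvStepA
        rw [if_neg (by simp [hE]),
          if_pos (fun hc => hS2 ((pv_startswith_iff_slice line).mpr hc))]
        simp [pv_norm_eq_strip line hline]
      rw [hstep]
      exact pv_goB_some rest _ acc hrest

-- ===== VERDICT (by name: the statement is the Claim_ definition above) =====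
theorem medline_formatting_spec : Claim_equal_medline_formatting := by
  intro s _ hpre
  unfold Spec_medline_formatting medline_formatting medline_formatting_alt
  rw [pv_goB_none _ _ (pv_split_no_nl s) hpre, pv_foldl_pair]
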